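-- pv_equiv track=rewrite | github.com/adiens916/SUB-PJT-simple-atm | domain/account.py | validate_account_number
-- ===== SOURCE A (Python) =====
-- def validate_account_number(account_number: str) -> bool:
--     if not isinstance(account_number, str):
--         return False
--
--     parts = account_number.split("-")
--     if len(parts) != 3:
--         return False
--
--     lengths = [3, 3, 4]
--     for i in range(3):
--         if len(parts[i]) != lengths[i]:
--             return False
--         for num in parts[i]:
--             if not num.isdigit():
--                 return False
--
--     return True
-- ===== SOURCE B (Python) =====
-- def validate_account_number(account_number: str) -> bool:
--     if not isinstance(account_number, str):
--         return False
--     if len(account_number) != 12: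
--         return False
--     if account_number[3] != "-" or account_number[7] != "-":
--         return False
--     return all(account_number[i].isdigit() for i in (0, 1, 2, 4, 5, 6, 8, 9, 10, 11))
-- ===== Notes on version B (the rewrite author's own statement) =====
-- stated objective: alternative
-- what changed: Replaces the split-on-dash plus loop-over-three-parts structure with a single positional check: length 12, dashes at fixed indices 3 and 7, and a per-index isdigit scan over the ten digit positions.
import Mathlib
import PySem

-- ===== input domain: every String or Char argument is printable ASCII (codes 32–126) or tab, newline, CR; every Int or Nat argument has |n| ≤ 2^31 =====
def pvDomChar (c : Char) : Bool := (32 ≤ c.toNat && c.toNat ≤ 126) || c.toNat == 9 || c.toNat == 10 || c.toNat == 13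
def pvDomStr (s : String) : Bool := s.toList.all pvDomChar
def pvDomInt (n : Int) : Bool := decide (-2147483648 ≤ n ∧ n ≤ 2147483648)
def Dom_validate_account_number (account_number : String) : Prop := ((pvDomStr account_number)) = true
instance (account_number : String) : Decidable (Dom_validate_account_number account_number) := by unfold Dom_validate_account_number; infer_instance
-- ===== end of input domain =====

-- B validates by fixed positions (length 12, dashes at indices 3 and 7, digits elsewhere)
-- instead of A's split('-') plus a loop over the three parts; same cost, different decomposition.

-- ===== PORT A =====
def validate_account_number (account_number : String) : Bool :=
  let parts := PySem.Chars.splitOn account_number.toList ['-']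
  if parts.length ≠ 3 then false
  else
    let lengths : List Int := [3, 3, 4]
    (PySem.List.pyRange 0 3 1).all (fun i =>
      let part := PySem.List.pyGetD parts i []
      (PySem.Chars.len part == PySem.List.pyGetD lengths i 0)
        && part.all (fun num => PySem.Chars.isdigit num))

-- ===== PORT B =====
def validate_account_number_alt (account_number : String) : Bool :=
  let cs := account_number.toList
  if cs.length ≠ 12 then false
  -- indices 3 and 7 are in range after the length test, so pyGetD's default is never used
  else if !(PySem.List.pyGetD cs 3 ' ' == '-') || !(PySem.List.pyGetD cs 7 ' ' == '-') then false
  else ([0, 1, 2, 4, 5, 6, 8, 9, 10, 11] : List Int).all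
    (fun i => PySem.Chars.isdigit (PySem.List.pyGetD cs i ' '))

-- ===== PRECONDITION & SPEC =====
def Spec_validate_account_number (account_number : String) (out : Bool) : Prop := out = validate_account_number_alt account_number
instance (account_number : String) (out : Bool) : Decidable (Spec_validate_account_number account_number out) := by unfold Spec_validate_account_number; infer_instance

-- ===== CLAIM (what is proved, stated in full; the proofs are below) =====
def Claim_equal_validate_account_number : Prop := ∀ (account_number : String), Dom_validate_account_number account_number → Spec_validate_account_number account_number (validate_account_number account_number)

-- ===== LEMMAS AND PROOFS =====

-- Simple structural model of s.split("-") (single-character separator).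
def splitD : List Char → List (List Char)
  | [] => [[]]
  | c :: rest =>
    if c = '-' then [] :: splitD rest
    else
      match splitD rest with
      | [] => [[c]]
      | p :: ps => (c :: p) :: ps

lemma splitD_ne_nil (cs : List Char) : splitD cs ≠ [] := by
  cases cs with
  | nil => simp [splitD]
  | cons c rest =>
    simp only [splitD]
    split
    · simp
    · split <;> simp

-- prepend x to the head part
def consHead (x : List Char) : List (List Char) → List (List Char)
  | [] => [x]
  | p :: ps => (x ++ p) :: ps

lemma go_spec (l : List Char) (fuel : Nat) (cur : List Char) (acc : List (List Char))
    (h : l.length ≤ fuel) :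
    PySem.Chars.splitOn.go ['-'] fuel l cur acc = acc.reverse ++ consHead cur.reverse (splitD l) := by
  induction l generalizing fuel cur acc with
  | nil =>
    rw [PySem.Chars.splitOn.go.eq_def]
    cases fuel <;> simp [splitD, consHead]
  | cons c rest ih =>
    cases fuel with
    | zero => simp at h
    | succ f =>
      rw [PySem.Chars.splitOn.go.eq_def]
      simp only []
      by_cases hc : c = '-'
      · subst hc
        have hpre : List.isPrefixOf ['-'] ('-' :: rest) = true := by
          simp [List.isPrefixOf]
        rw [if_pos hpre]
        have : List.drop (List.length ['-']) ('-' :: rest) = rest := by simp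
        rw [this, ih f [] (List.reverse cur :: acc) (by simpa using Nat.le_of_succ_le_succ h)]
        rcases hrest : splitD rest with _ | ⟨p, ps⟩
        · exact absurd hrest (splitD_ne_nil rest)
        · simp [splitD, consHead, hrest]
      · have hpre : List.isPrefixOf ['-'] (c :: rest) = false := by
          simp [List.isPrefixOf]
          exact fun hx => hc hx.symm
        rw [hpre]
        simp only [Bool.false_eq_true, if_false]
        rw [ih f (c :: cur) acc (by simpa using Nat.le_of_succ_le_succ h)]
        rcases hrest : splitD rest with _ | ⟨p, ps⟩
        · exact absurd hrest (splitD_ne_nil rest)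
        · simp [splitD, consHead, hrest, hc]

lemma splitOn_dash (cs : List Char) : PySem.Chars.splitOn cs ['-'] = splitD cs := by
  rw [PySem.Chars.splitOn]
  rw [go_spec cs (cs.length + 1) [] [] (Nat.le_succ _)]
  rcases hcs : splitD cs with _ | ⟨p, ps⟩
  · exact absurd hcs (splitD_ne_nil cs)
  · simp [consHead]

-- join with '-' inverts splitD
def joinD : List (List Char) → List Char
  | [] => []
  | [p] => p
  | p :: ps => p ++ '-' :: joinD ps

lemma joinD_splitD (cs : List Char) : joinD (splitD cs) = cs := by
  induction cs with
  | nil => simp [splitD, joinD]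
  | cons c rest ih =>
    by_cases hc : c = '-'
    · subst hc
      rcases hrest : splitD rest with _ | ⟨p, ps⟩
      · exact absurd hrest (splitD_ne_nil rest)
      · have hs : splitD ('-' :: rest) = [] :: splitD rest := by simp [splitD]
        rw [hs, hrest]
        simp only [joinD, List.nil_append]
        rw [← hrest, ih]
    · rcases hrest : splitD rest with _ | ⟨p, ps⟩
      · exact absurd hrest (splitD_ne_nil rest)
      · simp only [splitD, if_neg hc, hrest]
        cases ps with
        | nil =>
          have := ih; rw [hrest] at this; simp [joinD] at this
          simp [joinD, this]
        | cons q qs =>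
          have := ih; rw [hrest] at this; simp [joinD] at this
          simp [joinD, ← this]

lemma isdigit_ne_dash {c : Char} (h : PySem.Chars.isdigit c = true) : ¬(c = '-') := by
  rintro rfl; exact absurd h (by decide)

lemma len3 (p : List Char) (h : p.length = 3) : ∃ a b c, p = [a, b, c] := by
  rcases p with _ | ⟨a, _ | ⟨b, _ | ⟨c, _ | ⟨d, t⟩⟩⟩⟩ <;> simp_all
lemma len4 (p : List Char) (h : p.length = 4) : ∃ a b c d, p = [a, b, c, d] := by
  rcases p with _ | ⟨a, _ | ⟨b, _ | ⟨c, _ | ⟨d, _ | ⟨e, t⟩⟩⟩⟩⟩ <;> simp_all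

lemma len12 (cs : List Char) (h : cs.length = 12) :
    ∃ a b c d e f g h' i j k l, cs = [a, b, c, d, e, f, g, h', i, j, k, l] := by
  rcases cs with _ | ⟨a, _ | ⟨b, _ | ⟨c, _ | ⟨d, _ | ⟨e, _ | ⟨f, _ | ⟨g, _ | ⟨h', _ | ⟨i, _ | ⟨j, _ | ⟨k, _ | ⟨l, _ | ⟨m, t⟩⟩⟩⟩⟩⟩⟩⟩⟩⟩⟩⟩⟩ <;> simp_all

lemma main_eq (s : String) : validate_account_number s = validate_account_number_alt s := by
  unfold validate_account_number validate_account_number_alt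
  generalize s.toList = cs
  rw [splitOn_dash]
  rw [Bool.eq_iff_iff]
  constructor
  · intro hA
    dsimp only at hA ⊢
    split_ifs at hA with h3
    have h3' : (splitD cs).length = 3 := by omega
    obtain ⟨p1, p2, p3, hsplit⟩ : ∃ p1 p2 p3, splitD cs = [p1, p2, p3] := by
      rcases hp : splitD cs with _ | ⟨q1, _ | ⟨q2, _ | ⟨q3, _ | ⟨q4, t⟩⟩⟩⟩ <;> simp_all
    rw [hsplit] at hA
    have hR : PySem.List.pyRange 0 3 1 = [0, 1, 2] := by decide
    rw [hR] at hA
    simp only [List.all_cons, List.all_nil, Bool.and_true, Bool.and_eq_true, beq_iff_eq] at hA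
    simp only [PySem.List.pyGetD, PySem.List.pyIdx?, PySem.List.pyGet?] at hA
    norm_num [PySem.Chars.len] at hA
    simp only [show Int.toNat 2 = 2 from rfl, List.getElem_cons_succ,
      List.getElem_cons_zero] at hA
    obtain ⟨⟨hl1, hd1⟩, ⟨hl2, hd2⟩, hl3, hd3⟩ := hA
    have hcs := joinD_splitD cs
    rw [hsplit] at hcs
    simp only [joinD] at hcs
    obtain ⟨a, b, c, rfl⟩ := len3 p1 (by exact_mod_cast hl1)
    obtain ⟨d, e, f, rfl⟩ := len3 p2 (by exact_mod_cast hl2)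
    obtain ⟨g, h', i, j, rfl⟩ := len4 p3 (by exact_mod_cast hl3)
    subst hcs
    simp [PySem.List.pyGetD, PySem.List.pyIdx?, PySem.List.pyGet?,
      hd1 a (by simp), hd1 b (by simp), hd1 c (by simp),
      hd2 d (by simp), hd2 e (by simp), hd2 f (by simp),
      hd3 g (by simp), hd3 h' (by simp), hd3 i (by simp), hd3 j (by simp)]
  · intro hB
    dsimp only at hB ⊢
    split_ifs at hB with h12 hdash
    have h12' : cs.length = 12 := by omega
    obtain ⟨a, b, c, d3, e, f, g, d7, h', i, j, k, rfl⟩ := len12 cs h12'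
    simp only [PySem.List.pyGetD, PySem.List.pyIdx?, PySem.List.pyGet?] at hdash hB
    norm_num at hdash hB
    simp only [show Int.toNat 2 = 2 from rfl, show Int.toNat 4 = 4 from rfl,
      show Int.toNat 5 = 5 from rfl, show Int.toNat 6 = 6 from rfl,
      show Int.toNat 8 = 8 from rfl, show Int.toNat 9 = 9 from rfl,
      show Int.toNat 10 = 10 from rfl, show Int.toNat 11 = 11 from rfl,
      List.getElem_cons_succ, List.getElem_cons_zero] at hB
    obtain ⟨hda, hdb⟩ := hdash
    subst hda; subst hdb
    obtain ⟨h0, h1, h2, h4, h5, h6, h8, h9, h10, h11⟩ := hB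
    have hs : splitD [a, b, c, '-', e, f, g, '-', h', i, j, k]
        = [[a, b, c], [e, f, g], [h', i, j, k]] := by
      simp [splitD, isdigit_ne_dash h0, isdigit_ne_dash h1, isdigit_ne_dash h2,
        isdigit_ne_dash h4, isdigit_ne_dash h5, isdigit_ne_dash h6, isdigit_ne_dash h8,
        isdigit_ne_dash h9, isdigit_ne_dash h10, isdigit_ne_dash h11]
    have hR : PySem.List.pyRange 0 3 1 = [0, 1, 2] := by decide
    rw [hs, hR]
    simp [PySem.List.pyGetD, PySem.List.pyIdx?, PySem.List.pyGet?, PySem.Chars.len,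
      h0, h1, h2, h4, h5, h6, h8, h9, h10, h11]

-- ===== VERDICT (by name: the statement is the Claim_ definition above) =====
theorem validate_account_number_spec : Claim_equal_validate_account_number := by
  intro s _
  exact main_eq s
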